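-- pv_equiv track=rewrite | github.com/deltahdl/deltahdl.org | src/workflowctl/compute_roots.py | compute_merge_roots
-- ===== SOURCE A (Python) =====
-- from typing import Any
--
-- def get_all_ancestors(
--     workflow: str, graph: dict[str, Any], cache: dict[str, set[str]] | None = None
-- ) -> set[str]:
--     """
--     Get all ancestors (transitive dependencies) of a workflow.
--
--     Returns a set of workflow keys that this workflow depends on,
--     including indirect dependencies.
--     """
--     if cache is None:
--         cache = {}
--
--     if workflow in cache:
--         return cache[workflow]
--
--     ancestors: set[str] = set()
--     direct_deps = graph.get(workflow, {}).get("depends_on", [])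
--
--     for dep in direct_deps:
--         ancestors.add(dep)
--         ancestors.update(get_all_ancestors(dep, graph, cache))
--
--     cache[workflow] = ancestors
--     return ancestors
--
-- def compute_merge_roots(
--     running_workflows: list[str],
--     new_roots: list[str],
--     graph: dict[str, Any]
-- ) -> list[str]:
--     """
--     Compute the minimal set of root workflows that covers both
--     running workflows and new roots.
--
--     This is used when a new workflowctl run starts while workflows from
--     a previous run are still executing. The merge roots are the oldest
--     ancestors that need to be (re)started to cover both the running
--     workflows and the new changes.
--     """
--     # If no new roots, nothing to merge - let running workflows finish
--     if not new_roots: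
--         return []
--
--     # Combine all workflows that need to be covered
--     affected = set(running_workflows) | set(new_roots)
--
--     # Filter to only workflows that exist in the graph
--     affected = {wf for wf in affected if wf in graph}
--
--     if not affected:
--         return []
--
--     # Build ancestor cache
--     ancestor_cache: dict[str, set[str]] = {}
--     for workflow in affected:
--         get_all_ancestors(workflow, graph, ancestor_cache)
--
--     # Find merge roots: workflows with no affected ancestors
--     roots: list[str] = []
--     for workflow in affected:
--         ancestors = ancestor_cache.get(workflow, set())
--         # If none of this workflow's ancestors are in affected set, it's a root
--         if not ancestors.intersection(affected):
--             roots.append(workflow)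
--
--     # Sort for deterministic output
--     return sorted(roots)
-- ===== SOURCE B (Python) =====
-- def compute_merge_roots(running_workflows, new_roots, graph):
--     # Single reverse-edge traversal instead of per-node ancestor-set unions.
--     if not new_roots:
--         return []
--
--     affected = {wf for wf in running_workflows if wf in graph}
--     affected |= {wf for wf in new_roots if wf in graph}
--     if not affected:
--         return []
--
--     # Reverse adjacency: children[dep] = workflows that depend directly on dep.
--     children = {}
--     for node, info in graph.items():
--         for dep in info.get("depends_on", []):
--             children.setdefault(dep, []).append(node)
--
--     # Every node reachable from an affected node along reverse edges has an
--     # affected ancestor; collect them with one worklist traversal.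
--     reached = set()
--     stack = list(affected)
--     while stack:
--         cur = stack.pop()
--         for child in children.get(cur, []):
--             if child not in reached:
--                 reached.add(child)
--                 stack.append(child)
--
--     return sorted(wf for wf in affected if wf not in reached)
-- ===== Notes on version B (the rewrite author's own statement) =====
-- stated objective: alternative
-- what changed: Instead of building a full ancestor set per affected workflow via recursive set unions, B builds the reverse (children) adjacency once and does a single worklist traversal from the affected set, marking every node that has an affected ancestor; roots are the unmarked affected nodes.
import Mathlib
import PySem

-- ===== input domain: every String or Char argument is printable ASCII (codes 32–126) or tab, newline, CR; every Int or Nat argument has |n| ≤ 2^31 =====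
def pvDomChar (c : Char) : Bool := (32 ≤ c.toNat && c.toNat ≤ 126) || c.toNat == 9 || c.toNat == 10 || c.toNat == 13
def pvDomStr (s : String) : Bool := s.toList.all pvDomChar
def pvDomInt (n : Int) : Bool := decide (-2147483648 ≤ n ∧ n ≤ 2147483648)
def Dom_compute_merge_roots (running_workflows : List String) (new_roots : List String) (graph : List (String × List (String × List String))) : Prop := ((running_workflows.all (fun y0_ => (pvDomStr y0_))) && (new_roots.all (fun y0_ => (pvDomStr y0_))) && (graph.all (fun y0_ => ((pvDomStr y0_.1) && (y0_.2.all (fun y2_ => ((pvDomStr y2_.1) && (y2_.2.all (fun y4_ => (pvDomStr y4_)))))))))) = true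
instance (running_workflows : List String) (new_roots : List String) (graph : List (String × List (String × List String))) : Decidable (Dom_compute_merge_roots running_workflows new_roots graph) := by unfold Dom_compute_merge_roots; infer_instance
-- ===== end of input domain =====

-- B replaces A's per-node recursive ancestor-set unions by one reverse-edge worklist
-- traversal marking every node that has an affected ancestor (a different algorithm).
-- ===== PORT A =====

-- graph.get(workflow, {}).get("depends_on", [])
def pvDeps (g : List (String × List (String × List String))) (w : String) : List String :=
  PySem.Dict.getD (PySem.Dict.mk ((PySem.Dict.get? (PySem.Dict.mk g) w).getD [])) "depends_on" []

-- get_all_ancestors, fuel-totalized (the fuel only makes the recursion terminate in Lean)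
def pvGAA (g : List (String × List (String × List String))) :
    Nat → String → PySem.Dict String (PySem.Set String) →
    PySem.Set String × PySem.Dict String (PySem.Set String)
  | 0, _, cache => (PySem.Set.empty, cache)
  | fuel+1, w, cache =>
    match PySem.Dict.get? cache w with
    | some s => (s, cache)
    | none =>
      let p := (pvDeps g w).foldl
        (fun (st : PySem.Set String × PySem.Dict String (PySem.Set String)) dep =>
          let anc := PySem.Set.add st.1 dep
          let r := pvGAA g fuel dep st.2
          (PySem.Set.update anc r.1, r.2))
        (PySem.Set.empty, cache)
      (p.1, PySem.Dict.insert p.2 w p.1)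

def compute_merge_roots (running_workflows : List String) (new_roots : List String) (graph : List (String × List (String × List String))) : List String :=
  if new_roots.isEmpty then []
  else
    let affected0 := PySem.Set.union (PySem.Set.ofList running_workflows) (PySem.Set.ofList new_roots)
    let affected := affected0.filter (fun wf => PySem.Dict.contains (PySem.Dict.mk graph) wf)
    if affected.isEmpty then []
    else
      let cache := affected.foldl
        (fun c wf => (pvGAA graph (graph.length + 1) wf c).2) (PySem.Dict.mk [])
      let roots := affected.foldl
        (fun acc wf =>
          let anc := PySem.Dict.getD cache wf PySem.Set.empty
          if (PySem.Set.inter anc affected).isEmpty then acc ++ [wf] else acc)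
        ([] : List String)
      PySem.List.sorted roots (fun x => x) false

-- ===== PORT B =====

-- children[dep] = workflows depending directly on dep (reverse adjacency)
def pvChildren (graph : List (String × List (String × List String))) : PySem.Dict String (List String) :=
  graph.foldl
    (fun d p =>
      (PySem.Dict.getD (PySem.Dict.mk p.2) "depends_on" []).foldl
        (fun d dep => PySem.Dict.modify d dep [] (fun l => l ++ [p.1])) d)
    (PySem.Dict.mk [])

-- the worklist loop (stack.pop() pops the last element); fuel bounds the number of
-- iterations, which never exceeds |affected| + total number of dependency edges
def pvVisit (children : PySem.Dict String (List String)) :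
    Nat → List String → PySem.Set String → PySem.Set String
  | 0, _, reached => reached
  | fuel+1, stack, reached =>
    if h : stack = [] then reached
    else
      let cur := stack.getLast h
      let rest := stack.dropLast
      let st := (PySem.Dict.getD children cur []).foldl
        (fun (st : PySem.Set String × List String) child =>
          if PySem.Set.contains st.1 child then st
          else (PySem.Set.add st.1 child, st.2 ++ [child]))
        (reached, rest)
      pvVisit children fuel st.2 st.1

def compute_merge_roots_alt (running_workflows : List String) (new_roots : List String) (graph : List (String × List (String × List String))) : List String :=
  if new_roots.isEmpty then []
  else
    let inG := fun wf => PySem.Dict.contains (PySem.Dict.mk graph) wf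
    let affected := PySem.Set.union
      (PySem.Set.ofList (running_workflows.filter inG))
      (PySem.Set.ofList (new_roots.filter inG))
    if affected.isEmpty then []
    else
      let children := pvChildren graph
      let fuel := affected.length +
        (graph.map (fun p => (PySem.Dict.getD (PySem.Dict.mk p.2) "depends_on" []).length)).sum + 1
      let reached := pvVisit children fuel affected PySem.Set.empty
      PySem.List.sorted (affected.filter (fun wf => !(PySem.Set.contains reached wf))) (fun x => x) false

-- ===== PRECONDITION & SPEC =====

-- pvOkD g n w = true iff every dependency chain starting at w has at most n edges
def pvOkD (g : List (String × List (String × List String))) : Nat → String → Bool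
  | 0, w => (pvDeps g w).isEmpty
  | n+1, w => (pvDeps g w).all (pvOkD g n)

-- Pre_ requires (i) distinct keys in the association list (a Python dict always has
-- unique keys, so lists with duplicates encode no Python input) and (ii) no dependency
-- cycle reachable from an affected workflow — equivalently (pvOkD), every dependency
-- chain from an affected workflow has at most |graph| edges, a shape bound on the graph
-- (neither port computes chain depths) — since on a reachable cycle A's recursion never
-- returns (RecursionError); B returns the normal result there.
def Pre_compute_merge_roots (running_workflows : List String) (new_roots : List String) (graph : List (String × List (String × List String))) : Prop :=
  (graph.map (·.1)).Nodup ∧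
  ∀ wf ∈ running_workflows ++ new_roots,
    PySem.Dict.contains (PySem.Dict.mk graph) wf = true → pvOkD graph graph.length wf = true
instance (running_workflows : List String) (new_roots : List String) (graph : List (String × List (String × List String))) : Decidable (Pre_compute_merge_roots running_workflows new_roots graph) := by unfold Pre_compute_merge_roots; infer_instance

def pvWitness_compute_merge_roots : List String × List String × (List (String × List (String × List String))) :=
  (["a"], ["b"], [("a", [("depends_on", ["c"])]), ("b", [])])

def Spec_compute_merge_roots (running_workflows : List String) (new_roots : List String) (graph : List (String × List (String × List String))) (out : List String) : Prop := out = compute_merge_roots_alt running_workflows new_roots graph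
instance (running_workflows : List String) (new_roots : List String) (graph : List (String × List (String × List String))) (out : List String) : Decidable (Spec_compute_merge_roots running_workflows new_roots graph out) := by unfold Spec_compute_merge_roots; infer_instance

-- ===== CLAIM (what is proved, stated in full; the proofs are below) =====
def Claim_equal_compute_merge_roots : Prop := ∀ (running_workflows : List String) (new_roots : List String) (graph : List (String × List (String × List String))), Dom_compute_merge_roots running_workflows new_roots graph → Pre_compute_merge_roots running_workflows new_roots graph → Spec_compute_merge_roots running_workflows new_roots graph (compute_merge_roots running_workflows new_roots graph)

-- ===== LEMMAS AND PROOFS =====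

-- d is a (transitive) ancestor of x in the dependency graph
inductive pvRch (g : List (String × List (String × List String))) : String → String → Prop
  | head {x d : String} : d ∈ pvDeps g x → pvRch g x d
  | tail {x m d : String} : m ∈ pvDeps g x → pvRch g m d → pvRch g x d

lemma pvRch_iff (g : List (String × List (String × List String))) (w d : String) :
    pvRch g w d ↔ ∃ m ∈ pvDeps g w, d = m ∨ pvRch g m d := by
  constructor
  · intro h
    cases h with
    | head h => exact ⟨_, h, Or.inl rfl⟩
    | tail hm hr => exact ⟨_, hm, Or.inr hr⟩
  · rintro ⟨m, hm, rfl | hr⟩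
    · exact .head hm
    · exact .tail hm hr

-- a cache is good if every stored set is exactly the ancestor set
def pvGood (g : List (String × List (String × List String)))
    (c : PySem.Dict String (PySem.Set String)) : Prop :=
  ∀ w s, c.get? w = some s → ∀ d, d ∈ s ↔ pvRch g w d

lemma pvOkD_deps {g : List (String × List (String × List String))} {n : Nat} {w : String}
    (h : pvOkD g (n+1) w = true) : ∀ dep ∈ pvDeps g w, pvOkD g n dep = true := by
  intro dep hd
  simp only [pvOkD, List.all_eq_true] at h
  exact h dep hd

lemma pvOkD_zero_deps {g : List (String × List (String × List String))} {w : String}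
    (h : pvOkD g 0 w = true) : pvDeps g w = [] := by
  simpa [pvOkD, List.isEmpty_iff] using h

lemma pvGood_insert {g : List (String × List (String × List String))}
    {c : PySem.Dict String (PySem.Set String)} {w : String} {s : PySem.Set String}
    (hg : pvGood g c) (hs : ∀ d, d ∈ s ↔ pvRch g w d) :
    pvGood g (c.insert w s) := by
  intro w' s' h
  by_cases hw : w' = w
  · rw [PySem.Dict.get?_insert, if_pos hw] at h
    cases h
    subst hw
    exact hs
  · rw [PySem.Dict.get?_insert, if_neg hw] at h
    exact hg _ _ h

lemma pvContains_insert (c : PySem.Dict String (PySem.Set String)) (w : String)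
    (s : PySem.Set String) (k : String) :
    (c.insert w s).contains k = true ↔ k = w ∨ c.contains k = true := by
  rw [PySem.Dict.contains_eq_isSome_get?, PySem.Dict.get?_insert, PySem.Dict.contains_eq_isSome_get?]
  split <;> simp_all

lemma pvContains_get {c : PySem.Dict String (PySem.Set String)} {k : String}
    (h : c.contains k = true) : ∃ s, c.get? k = some s :=
  Option.isSome_iff_exists.mp (by rw [← PySem.Dict.contains_eq_isSome_get?]; exact h)

lemma pvGAA_fold (g : List (String × List (String × List String))) (fuel : Nat)
    (IH : ∀ n w c, pvGood g c → pvOkD g n w = true → n < fuel →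
      pvGood g (pvGAA g fuel w c).2 ∧
      (∀ d, d ∈ (pvGAA g fuel w c).1 ↔ pvRch g w d) ∧
      PySem.Dict.contains (pvGAA g fuel w c).2 w = true ∧
      (∀ k, PySem.Dict.contains c k = true → PySem.Dict.contains (pvGAA g fuel w c).2 k = true))
    (n : Nat) :
    ∀ (l : List String), (∀ dep ∈ l, pvOkD g n dep = true ∧ n < fuel) →
    ∀ (acc : PySem.Set String) (c : PySem.Dict String (PySem.Set String)), pvGood g c →
      pvGood g (l.foldl (fun st dep =>
          (PySem.Set.update (PySem.Set.add st.1 dep) (pvGAA g fuel dep st.2).1,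
           (pvGAA g fuel dep st.2).2)) (acc, c)).2 ∧
      (∀ d, d ∈ (l.foldl (fun st dep =>
          (PySem.Set.update (PySem.Set.add st.1 dep) (pvGAA g fuel dep st.2).1,
           (pvGAA g fuel dep st.2).2)) (acc, c)).1 ↔ d ∈ acc ∨ ∃ m ∈ l, d = m ∨ pvRch g m d) ∧
      (∀ k, PySem.Dict.contains c k = true →
        PySem.Dict.contains ((l.foldl (fun st dep =>
          (PySem.Set.update (PySem.Set.add st.1 dep) (pvGAA g fuel dep st.2).1,
           (pvGAA g fuel dep st.2).2)) (acc, c)).2) k = true) := by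
  intro l
  induction l with
  | nil =>
    intro _ acc c hg
    refine ⟨hg, ?_, fun k hk => hk⟩
    simp
  | cons dep l ihl =>
    intro hdeps acc c hg
    obtain ⟨hok1, hlt1⟩ := hdeps dep (by simp)
    obtain ⟨hg1, hmem1, _, hmono1⟩ := IH n dep c hg hok1 hlt1
    simp only [List.foldl_cons]
    obtain ⟨hgF, hmemF, hmonoF⟩ := ihl (fun d hd => hdeps d (by simp [hd]))
      (PySem.Set.update (PySem.Set.add acc dep) (pvGAA g fuel dep c).1) (pvGAA g fuel dep c).2 hg1
    refine ⟨hgF, ?_, fun k hk => hmonoF k (hmono1 k hk)⟩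
    intro d
    rw [hmemF d]
    simp only [PySem.Set.mem_update, PySem.Set.mem_add, hmem1 d, List.mem_cons]
    constructor
    · rintro (((h | h) | h) | ⟨m, hm, h⟩)
      · exact Or.inl h
      · exact Or.inr ⟨dep, Or.inl rfl, Or.inl h⟩
      · exact Or.inr ⟨dep, Or.inl rfl, Or.inr h⟩
      · exact Or.inr ⟨m, Or.inr hm, h⟩
    · rintro (h | ⟨m, rfl | hm, h⟩)
      · exact Or.inl (Or.inl (Or.inl h))
      · rcases h with h | h
        · exact Or.inl (Or.inl (Or.inr h))
        · exact Or.inl (Or.inr h)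
      · exact Or.inr ⟨m, hm, h⟩

lemma pvGAA_spec (g : List (String × List (String × List String))) :
    ∀ fuel n w c, pvGood g c → pvOkD g n w = true → n < fuel →
      pvGood g (pvGAA g fuel w c).2 ∧
      (∀ d, d ∈ (pvGAA g fuel w c).1 ↔ pvRch g w d) ∧
      PySem.Dict.contains (pvGAA g fuel w c).2 w = true ∧
      (∀ k, PySem.Dict.contains c k = true → PySem.Dict.contains (pvGAA g fuel w c).2 k = true) := by
  intro fuel
  induction fuel with
  | zero => intro n w c _ _ hn; omega
  | succ fuel ih =>
    intro n w c hg hok hn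
    cases hcw : PySem.Dict.get? c w with
    | some s =>
      have h1 : pvGAA g (fuel+1) w c = (s, c) := by simp only [pvGAA, hcw]
      rw [h1]
      exact ⟨hg, hg w s hcw,
        by rw [PySem.Dict.contains_eq_isSome_get?, hcw]; rfl, fun k hk => hk⟩
    | none =>
      have hdn : ∀ dep ∈ pvDeps g w, pvOkD g (n-1) dep = true ∧ (n-1) < fuel := by
        intro dep hd
        cases n with
        | zero => rw [pvOkD_zero_deps hok] at hd; cases hd
        | succ n' => exact ⟨pvOkD_deps hok dep hd, by omega⟩
      obtain ⟨hgF, hmemF, hmonoF⟩ :=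
        pvGAA_fold g fuel ih (n-1) (pvDeps g w) hdn PySem.Set.empty c hg
      have hchar : ∀ d, d ∈ ((pvDeps g w).foldl (fun st dep =>
          (PySem.Set.update (PySem.Set.add st.1 dep) (pvGAA g fuel dep st.2).1,
           (pvGAA g fuel dep st.2).2)) (PySem.Set.empty, c)).1 ↔ pvRch g w d := by
        intro d
        rw [hmemF d, pvRch_iff]
        simp [PySem.Set.empty]
      have h1 : pvGAA g (fuel+1) w c =
          (((pvDeps g w).foldl (fun st dep =>
            (PySem.Set.update (PySem.Set.add st.1 dep) (pvGAA g fuel dep st.2).1,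
             (pvGAA g fuel dep st.2).2)) (PySem.Set.empty, c)).1,
           PySem.Dict.insert ((pvDeps g w).foldl (fun st dep =>
            (PySem.Set.update (PySem.Set.add st.1 dep) (pvGAA g fuel dep st.2).1,
             (pvGAA g fuel dep st.2).2)) (PySem.Set.empty, c)).2 w
            ((pvDeps g w).foldl (fun st dep =>
            (PySem.Set.update (PySem.Set.add st.1 dep) (pvGAA g fuel dep st.2).1,
             (pvGAA g fuel dep st.2).2)) (PySem.Set.empty, c)).1) := by
        simp only [pvGAA, hcw]
      rw [h1]
      refine ⟨pvGood_insert hgF hchar, hchar, ?_, ?_⟩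
      · exact (pvContains_insert _ _ _ _).mpr (Or.inl rfl)
      · intro k hk
        exact (pvContains_insert _ _ _ _).mpr (Or.inr (hmonoF k hk))

-- the cache-building loop of A
lemma pvCache_spec (g : List (String × List (String × List String))) (aff : List String)
    (hok : ∀ wf ∈ aff, pvOkD g g.length wf = true) :
    ∀ c, pvGood g c →
      pvGood g (aff.foldl (fun c wf => (pvGAA g (g.length + 1) wf c).2) c) ∧
      (∀ k, PySem.Dict.contains c k = true →
        PySem.Dict.contains (aff.foldl (fun c wf => (pvGAA g (g.length + 1) wf c).2) c) k = true) ∧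
      ∀ wf ∈ aff, PySem.Dict.contains (aff.foldl (fun c wf => (pvGAA g (g.length + 1) wf c).2) c) wf = true := by
  induction aff with
  | nil => exact fun c hg => ⟨hg, fun k hk => hk, by simp⟩
  | cons wf aff ih =>
    intro c hg
    obtain ⟨hg1, hmem1, hctn1, hmono1⟩ :=
      pvGAA_spec g (g.length + 1) g.length wf c hg (hok wf (by simp)) (by omega)
    obtain ⟨hgF, hmonoF, hallF⟩ := ih (fun w hw => hok w (by simp [hw])) _ hg1
    simp only [List.foldl_cons]
    refine ⟨hgF, fun k hk => hmonoF k (hmono1 k hk), ?_⟩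
    intro w hw
    rcases List.mem_cons.mp hw with rfl | hw'
    · exact hmonoF _ hctn1
    · exact hallF w hw'

-- ----- B side -----

def pvP (g : List (String × List (String × List String))) : List (String × String) :=
  g.flatMap (fun p => (PySem.Dict.getD (PySem.Dict.mk p.2) "depends_on" []).map (fun dep => (dep, p.1)))

def pvK (g : List (String × List (String × List String))) : List String := (pvP g).map (·.2)

lemma pvChildren_getD (g : List (String × List (String × List String))) (c : String) :
    (pvChildren g).getD c [] = ((pvP g).filter (fun q => q.1 == c)).map (·.2) := by
  have hfuse : pvChildren g =
      (pvP g).foldl (fun d q => d.modify q.1 [] (fun l => l ++ [q.2])) (PySem.Dict.mk []) := by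
    rw [pvP, List.foldl_flatMap]
    simp [pvChildren, List.foldl_map]
  rw [hfuse, PySem.Dict.getD_foldl_modify_append]
  simp [PySem.Dict.getD_eq_get?_getD, PySem.Dict.get?]

lemma pvMem_children {g : List (String × List (String × List String))}
    (hnd : (g.map (·.1)).Nodup) (c x : String) :
    x ∈ (pvChildren g).getD c [] ↔ c ∈ pvDeps g x := by
  have hP : (c, x) ∈ pvP g ↔ c ∈ pvDeps g x := by
    simp only [pvP, List.mem_flatMap, List.mem_map]
    constructor
    · rintro ⟨p, hp, dep, hdep, heq⟩
      obtain ⟨h1, h2⟩ := Prod.mk.injEq _ _ _ _ ▸ heq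
      have hget : PySem.Dict.get? (PySem.Dict.mk g) x = some p.2 := by
        rw [PySem.Dict.get?_eq_some_iff_mem_items _ _ _ (by rw [PySem.Dict.keys_mk]; exact hnd)]
        show (x, p.2) ∈ g
        have : p = (x, p.2) := by cases p; simp_all
        rw [← this]; exact hp
      subst h1
      unfold pvDeps
      rw [hget]
      exact hdep
    · intro hc
      cases hq : PySem.Dict.get? (PySem.Dict.mk g) x with
      | none =>
        have hdeps : pvDeps g x = [] := by unfold pvDeps; rw [hq]; rfl
        rw [hdeps] at hc
        cases hc
      | some info =>
        have hmem : (x, info) ∈ g :=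
          (PySem.Dict.get?_eq_some_iff_mem_items _ _ _ (by rw [PySem.Dict.keys_mk]; exact hnd)).1 hq
        have hdeps : pvDeps g x = PySem.Dict.getD (PySem.Dict.mk info) "depends_on" [] := by
          unfold pvDeps; rw [hq]; rfl
        exact ⟨(x, info), hmem, c, hdeps ▸ hc, rfl⟩
  rw [pvChildren_getD, ← hP]
  simp only [List.mem_map, List.mem_filter, beq_iff_eq]
  constructor
  · rintro ⟨q, ⟨hq, h1⟩, h2⟩
    have : q = (c, x) := by cases q; simp_all
    rwa [this] at hq
  · intro h
    exact ⟨(c, x), ⟨h, rfl⟩, rfl⟩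

lemma pvNodupSubsetLength {l L : List String} (h1 : l.Nodup) (h2 : l ⊆ L) :
    l.length ≤ L.length := by
  have e1 := List.toFinset_card_of_nodup h1
  have h3 : l.toFinset ⊆ L.toFinset := by
    intro a ha
    rw [List.mem_toFinset] at ha ⊢
    exact h2 ha
  have e2 := Finset.card_le_card h3
  have e3 := L.toFinset_card_le
  omega

lemma pvKs_sub (g : List (String × List (String × List String))) (c : String) :
    ∀ x ∈ (pvChildren g).getD c [], x ∈ pvK g := by
  intro x hx
  rw [pvChildren_getD] at hx
  simp only [List.mem_map, List.mem_filter] at hx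
  obtain ⟨q, ⟨hq, _⟩, hqx⟩ := hx
  simp only [pvK, List.mem_map]
  exact ⟨q, hq, hqx⟩

lemma pvVisitFold (ks : List String) : ∀ (r : PySem.Set String) (s : List String), r.Nodup →
    ((ks.foldl (fun (st : PySem.Set String × List String) child =>
        if PySem.Set.contains st.1 child then st
        else (PySem.Set.add st.1 child, st.2 ++ [child])) (r, s)).1.Nodup) ∧
    (∀ x, x ∈ (ks.foldl (fun (st : PySem.Set String × List String) child =>
        if PySem.Set.contains st.1 child then st
        else (PySem.Set.add st.1 child, st.2 ++ [child])) (r, s)).1 ↔ x ∈ r ∨ x ∈ ks) ∧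
    (∀ x ∈ (ks.foldl (fun (st : PySem.Set String × List String) child =>
        if PySem.Set.contains st.1 child then st
        else (PySem.Set.add st.1 child, st.2 ++ [child])) (r, s)).1, x ∈ r ∨ x ∈ (ks.foldl (fun (st : PySem.Set String × List String) child =>
        if PySem.Set.contains st.1 child then st
        else (PySem.Set.add st.1 child, st.2 ++ [child])) (r, s)).2) ∧
    (∀ e ∈ (ks.foldl (fun (st : PySem.Set String × List String) child =>
        if PySem.Set.contains st.1 child then st
        else (PySem.Set.add st.1 child, st.2 ++ [child])) (r, s)).2, e ∈ s ∨ e ∈ ks) ∧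
    (∀ e ∈ s, e ∈ (ks.foldl (fun (st : PySem.Set String × List String) child =>
        if PySem.Set.contains st.1 child then st
        else (PySem.Set.add st.1 child, st.2 ++ [child])) (r, s)).2) ∧
    ((ks.foldl (fun (st : PySem.Set String × List String) child =>
        if PySem.Set.contains st.1 child then st
        else (PySem.Set.add st.1 child, st.2 ++ [child])) (r, s)).1.length + s.length =
      (ks.foldl (fun (st : PySem.Set String × List String) child =>
        if PySem.Set.contains st.1 child then st
        else (PySem.Set.add st.1 child, st.2 ++ [child])) (r, s)).2.length + r.length) := by
  induction ks with
  | nil =>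
    intro r s hnd
    simp only [List.foldl_nil]
    exact ⟨hnd, by simp, fun x hx => Or.inl hx, fun e he => Or.inl he, fun e he => he, Nat.add_comm _ _⟩
  | cons k ks ih =>
    intro r s hnd
    simp only [List.foldl_cons]
    by_cases hc : PySem.Set.contains r k = true
    · rw [if_pos hc]
      have hkr : k ∈ r := by simpa [pysem] using hc
      obtain ⟨B1, B2, B3, B4, B5, B6⟩ := ih r s hnd
      refine ⟨B1, ?_, B3, ?_, B5, B6⟩
      · intro x
        rw [B2 x]
        simp only [List.mem_cons]
        constructor
        · rintro (h | h)
          · exact Or.inl h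
          · exact Or.inr (Or.inr h)
        · rintro (h | rfl | h)
          · exact Or.inl h
          · exact Or.inl hkr
          · exact Or.inr h
      · intro e he
        rcases B4 e he with h | h
        · exact Or.inl h
        · exact Or.inr (List.mem_cons_of_mem _ h)
    · rw [if_neg hc]
      have hkr : k ∉ r := by
        intro h
        apply hc
        simpa [pysem] using h
      have hnd' : (PySem.Set.add r k).Nodup := PySem.Set.nodup_add r k hnd
      have hadd : PySem.Set.add r k = r ++ [k] := by
        rw [PySem.Set.add, if_neg hc]
      have hlen : (PySem.Set.add r k).length = r.length + 1 := by
        rw [hadd]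
        simp
      obtain ⟨B1, B2, B3, B4, B5, B6⟩ := ih (PySem.Set.add r k) (s ++ [k]) hnd'
      refine ⟨B1, ?_, ?_, ?_, ?_, ?_⟩
      · intro x
        rw [B2 x]
        rw [PySem.Set.mem_add r k x, List.mem_cons]
        exact or_assoc
      · intro x hx
        rcases B3 x hx with h | h
        · rcases (PySem.Set.mem_add r k x).mp h with h' | rfl
          · exact Or.inl h'
          · exact Or.inr (B5 x (by simp))
        · exact Or.inr h
      · intro e he
        rcases B4 e he with h | h
        · rcases List.mem_append.mp h with h' | h'
          · exact Or.inl h'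
          · simp only [List.mem_singleton] at h'
            subst h'
            exact Or.inr (by simp)
        · exact Or.inr (List.mem_cons_of_mem _ h)
      · intro e he
        exact B5 e (List.mem_append_left _ he)
      · simp only [List.length_append, List.length_singleton, hlen] at B6 ⊢
        omega

lemma pvVisit_spec (g : List (String × List (String × List String)))
    (hnd : (g.map (·.1)).Nodup) (aff : List String) :
    ∀ fuel stack reached,
      (∀ x ∈ reached, ∃ a ∈ aff, pvRch g x a) →
      (∀ e ∈ stack, e ∈ aff ∨ ∃ a ∈ aff, pvRch g e a) →
      (∀ u, (u ∈ aff ∨ u ∈ reached) → u ∈ stack ∨ ∀ c, u ∈ pvDeps g c → c ∈ reached) →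
      reached.Nodup → reached ⊆ pvK g →
      stack.length + (pvK g).length ≤ fuel + reached.length →
      (∀ x ∈ pvVisit (pvChildren g) fuel stack reached, ∃ a ∈ aff, pvRch g x a) ∧
      (∀ u, (u ∈ aff ∨ u ∈ pvVisit (pvChildren g) fuel stack reached) →
        ∀ c, u ∈ pvDeps g c → c ∈ pvVisit (pvChildren g) fuel stack reached) ∧
      (∀ x ∈ reached, x ∈ pvVisit (pvChildren g) fuel stack reached) := by
  intro fuel
  induction fuel with
  | zero =>
    intro stack reached hI1 hI2 hI3 hndR hsub hlen
    have hle := pvNodupSubsetLength hndR hsub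
    have hstack : stack = [] := List.eq_nil_of_length_eq_zero (by omega)
    subst hstack
    simp only [pvVisit]
    refine ⟨hI1, ?_, fun x hx => hx⟩
    intro u hu c hc
    rcases hI3 u hu with h | h
    · cases h
    · exact h c hc
  | succ fuel ih =>
    intro stack reached hI1 hI2 hI3 hndR hsub hlen
    by_cases h : stack = []
    · subst h
      simp only [pvVisit]
      rw [dif_pos trivial]
      refine ⟨hI1, ?_, fun x hx => hx⟩
      intro u hu c hc
      rcases hI3 u hu with h | h
      · cases h
      · exact h c hc
    · have hstack : stack.dropLast ++ [stack.getLast h] = stack := List.dropLast_append_getLast h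
      have hcur : stack.getLast h ∈ stack := List.getLast_mem h
      have hrest : ∀ e ∈ stack.dropLast, e ∈ stack := fun e he => List.dropLast_subset _ he
      have hks : ∀ x, x ∈ PySem.Dict.getD (pvChildren g) (stack.getLast h) [] ↔
          stack.getLast h ∈ pvDeps g x := fun x => pvMem_children hnd _ x
      have hksK := pvKs_sub g (stack.getLast h)
      obtain ⟨A1, A2, A3, A4, A5, A6⟩ :=
        pvVisitFold (PySem.Dict.getD (pvChildren g) (stack.getLast h) []) reached stack.dropLast hndR
      have hPks : ∀ x, stack.getLast h ∈ pvDeps g x → ∃ a ∈ aff, pvRch g x a := by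
        intro x hx
        rcases hI2 _ hcur with hc1 | ⟨a, ha, hr⟩
        · exact ⟨_, hc1, .head hx⟩
        · exact ⟨a, ha, .tail hx hr⟩
      have hunfold : pvVisit (pvChildren g) (fuel+1) stack reached =
          pvVisit (pvChildren g) fuel ((PySem.Dict.getD (pvChildren g) (stack.getLast h) []).foldl (fun (st : PySem.Set String × List String) child => if PySem.Set.contains st.1 child then st else (PySem.Set.add st.1 child, st.2 ++ [child])) (reached, stack.dropLast)).2 ((PySem.Dict.getD (pvChildren g) (stack.getLast h) []).foldl (fun (st : PySem.Set String × List String) child => if PySem.Set.contains st.1 child then st else (PySem.Set.add st.1 child, st.2 ++ [child])) (reached, stack.dropLast)).1 := by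
        simp only [pvVisit]
        rw [dif_neg h]
      have hI1' : ∀ x ∈ ((PySem.Dict.getD (pvChildren g) (stack.getLast h) []).foldl (fun (st : PySem.Set String × List String) child => if PySem.Set.contains st.1 child then st else (PySem.Set.add st.1 child, st.2 ++ [child])) (reached, stack.dropLast)).1, ∃ a ∈ aff, pvRch g x a := by
        intro x hx
        rcases (A2 x).mp hx with hxr | hxk
        · exact hI1 x hxr
        · exact hPks x ((hks x).mp hxk)
      have hI2' : ∀ e ∈ ((PySem.Dict.getD (pvChildren g) (stack.getLast h) []).foldl (fun (st : PySem.Set String × List String) child => if PySem.Set.contains st.1 child then st else (PySem.Set.add st.1 child, st.2 ++ [child])) (reached, stack.dropLast)).2, e ∈ aff ∨ ∃ a ∈ aff, pvRch g e a := by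
        intro e he
        rcases A4 e he with h1 | h1
        · exact hI2 e (hrest e h1)
        · exact Or.inr (hPks e ((hks e).mp h1))
      have hI3' : ∀ u, (u ∈ aff ∨ u ∈ ((PySem.Dict.getD (pvChildren g) (stack.getLast h) []).foldl (fun (st : PySem.Set String × List String) child => if PySem.Set.contains st.1 child then st else (PySem.Set.add st.1 child, st.2 ++ [child])) (reached, stack.dropLast)).1) →
          u ∈ ((PySem.Dict.getD (pvChildren g) (stack.getLast h) []).foldl (fun (st : PySem.Set String × List String) child => if PySem.Set.contains st.1 child then st else (PySem.Set.add st.1 child, st.2 ++ [child])) (reached, stack.dropLast)).2 ∨ ∀ c, u ∈ pvDeps g c → c ∈ ((PySem.Dict.getD (pvChildren g) (stack.getLast h) []).foldl (fun (st : PySem.Set String × List String) child => if PySem.Set.contains st.1 child then st else (PySem.Set.add st.1 child, st.2 ++ [child])) (reached, stack.dropLast)).1 := by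
        have main : ∀ u, u ∈ aff ∨ u ∈ reached →
            u ∈ ((PySem.Dict.getD (pvChildren g) (stack.getLast h) []).foldl (fun (st : PySem.Set String × List String) child => if PySem.Set.contains st.1 child then st else (PySem.Set.add st.1 child, st.2 ++ [child])) (reached, stack.dropLast)).2 ∨ ∀ c, u ∈ pvDeps g c → c ∈ ((PySem.Dict.getD (pvChildren g) (stack.getLast h) []).foldl (fun (st : PySem.Set String × List String) child => if PySem.Set.contains st.1 child then st else (PySem.Set.add st.1 child, st.2 ++ [child])) (reached, stack.dropLast)).1 := by
          intro u hu'
          rcases hI3 u hu' with hs | hcl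
          · rw [← hstack] at hs
            rcases List.mem_append.mp hs with h1 | h1
            · exact Or.inl (A5 u h1)
            · simp only [List.mem_singleton] at h1
              subst h1
              exact Or.inr (fun c hc => (A2 c).mpr (Or.inr ((hks c).mpr hc)))
          · exact Or.inr (fun c hc => (A2 c).mpr (Or.inl (hcl c hc)))
        intro u hu
        rcases hu with hu | hu
        · exact main u (Or.inl hu)
        · rcases A3 u hu with h1 | h1
          · exact main u (Or.inr h1)
          · exact Or.inl h1
      have hsub' : ((PySem.Dict.getD (pvChildren g) (stack.getLast h) []).foldl (fun (st : PySem.Set String × List String) child => if PySem.Set.contains st.1 child then st else (PySem.Set.add st.1 child, st.2 ++ [child])) (reached, stack.dropLast)).1 ⊆ pvK g := by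
        intro x hx
        rcases (A2 x).mp hx with h1 | h1
        · exact hsub h1
        · exact hksK x h1
      have hlen' : ((PySem.Dict.getD (pvChildren g) (stack.getLast h) []).foldl (fun (st : PySem.Set String × List String) child => if PySem.Set.contains st.1 child then st else (PySem.Set.add st.1 child, st.2 ++ [child])) (reached, stack.dropLast)).2.length + (pvK g).length ≤ fuel + ((PySem.Dict.getD (pvChildren g) (stack.getLast h) []).foldl (fun (st : PySem.Set String × List String) child => if PySem.Set.contains st.1 child then st else (PySem.Set.add st.1 child, st.2 ++ [child])) (reached, stack.dropLast)).1.length := by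
        have h1 : stack.length = stack.dropLast.length + 1 := by
          have hpos : stack.length ≠ 0 := by simpa using h
          rw [List.length_dropLast]
          omega
        omega
      obtain ⟨C1, C2, C3⟩ := ih ((PySem.Dict.getD (pvChildren g) (stack.getLast h) []).foldl (fun (st : PySem.Set String × List String) child => if PySem.Set.contains st.1 child then st else (PySem.Set.add st.1 child, st.2 ++ [child])) (reached, stack.dropLast)).2 ((PySem.Dict.getD (pvChildren g) (stack.getLast h) []).foldl (fun (st : PySem.Set String × List String) child => if PySem.Set.contains st.1 child then st else (PySem.Set.add st.1 child, st.2 ++ [child])) (reached, stack.dropLast)).1 hI1' hI2' hI3' A1 hsub' hlen'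
      rw [hunfold]
      exact ⟨C1, C2, fun x hx => C3 x ((A2 x).mpr (Or.inl hx))⟩

lemma pvVisit_complete (g : List (String × List (String × List String))) (aff : List String)
    (R : PySem.Set String)
    (hcl : ∀ u, (u ∈ aff ∨ u ∈ R) → ∀ c, u ∈ pvDeps g c → c ∈ R) :
    ∀ x a, pvRch g x a → a ∈ aff → x ∈ R := by
  intro x a h ha
  induction h with
  | head hd => exact hcl _ (Or.inl ha) _ hd
  | tail hm _ ih => exact hcl _ (Or.inr (ih ha)) _ hm

-- ----- assembly -----

theorem compute_merge_roots_spec : Claim_equal_compute_merge_roots := by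
  intro r n g hdom hpre
  obtain ⟨hnd, hok⟩ := hpre
  unfold Spec_compute_merge_roots
  have hcm : ∀ (l : PySem.Set String) (x : String), PySem.Set.contains l x = true ↔ x ∈ l := by
    intro l x
    simp [pysem]
  by_cases hnr : n.isEmpty = true
  · simp only [compute_merge_roots, compute_merge_roots_alt, hnr, if_true]
  · have hnr' : n.isEmpty = false := by simpa using hnr
    simp only [compute_merge_roots, compute_merge_roots_alt, hnr', Bool.false_eq_true, if_false]
    set pG := fun wf => PySem.Dict.contains (PySem.Dict.mk g) wf with hpG
    set affA := List.filter pG (PySem.Set.union (PySem.Set.ofList r) (PySem.Set.ofList n)) with haffA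
    set affB := PySem.Set.union (PySem.Set.ofList (List.filter pG r)) (PySem.Set.ofList (List.filter pG n)) with haffB
    have hmemA : ∀ x, x ∈ affA ↔ (x ∈ r ∨ x ∈ n) ∧ pG x = true := by
      intro x
      rw [haffA]
      simp only [List.mem_filter, PySem.Set.mem_union, PySem.Set.mem_ofList]
      try tauto
    have hmemB : ∀ x, x ∈ affB ↔ (x ∈ r ∨ x ∈ n) ∧ pG x = true := by
      intro x
      rw [haffB]
      simp only [PySem.Set.mem_union, PySem.Set.mem_ofList, List.mem_filter]
      try tauto
    have hAB : ∀ x, x ∈ affA ↔ x ∈ affB := fun x => by rw [hmemA, hmemB]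
    have hndA : affA.Nodup := by
      rw [haffA]
      exact (PySem.Set.nodup_union _ _ (PySem.Set.nodup_ofList _)).filter _
    have hndB : affB.Nodup := PySem.Set.nodup_union _ _ (PySem.Set.nodup_ofList _)
    by_cases haffAe : affA.isEmpty = true
    · have haffBe : affB.isEmpty = true := by
        rw [List.isEmpty_iff, List.eq_nil_iff_forall_not_mem]
        intro x hx
        exact List.eq_nil_iff_forall_not_mem.mp (List.isEmpty_iff.mp haffAe) x ((hAB x).mpr hx)
      rw [if_pos haffAe, if_pos haffBe]
    · have haffBe : ¬ affB.isEmpty = true := by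
        intro hB
        apply haffAe
        rw [List.isEmpty_iff, List.eq_nil_iff_forall_not_mem]
        intro x hx
        exact List.eq_nil_iff_forall_not_mem.mp (List.isEmpty_iff.mp hB) x ((hAB x).mp hx)
      rw [if_neg haffAe, if_neg haffBe]
      -- A side: the cache characterization
      have hokA : ∀ wf ∈ affA, pvOkD g g.length wf = true := by
        intro wf hwf
        obtain ⟨hrn, hpg⟩ := (hmemA wf).mp hwf
        exact hok wf (List.mem_append.mpr hrn) hpg
      have hgood0 : pvGood g (PySem.Dict.mk []) := by
        intro w s hws
        simp [PySem.Dict.get?] at hws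
      obtain ⟨hgoodF, _, hcontF⟩ := pvCache_spec g affA hokA (PySem.Dict.mk []) hgood0
      set cacheF := List.foldl (fun c wf => (pvGAA g (g.length + 1) wf c).2) (PySem.Dict.mk []) affA with hcF
      -- B side: the reached-set characterization
      set fuelB := affB.length + (g.map (fun p => (PySem.Dict.getD (PySem.Dict.mk p.2) "depends_on" []).length)).sum + 1 with hfB
      have hKlen : (pvK g).length = (g.map (fun p => (PySem.Dict.getD (PySem.Dict.mk p.2) "depends_on" []).length)).sum := by
        simp [pvK, pvP, List.length_flatMap, List.length_map]
      obtain ⟨S1, S2, S3⟩ := pvVisit_spec g hnd affB fuelB affB PySem.Set.empty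
        (by intro x hx; simp [PySem.Set.empty] at hx)
        (fun e he => Or.inl he)
        (by
          intro u hu
          rcases hu with h | h
          · exact Or.inl h
          · simp [PySem.Set.empty] at h)
        (by simp [PySem.Set.empty])
        (by intro x hx; simp [PySem.Set.empty] at hx)
        (by rw [hKlen] at *; simp [PySem.Set.empty]; omega)
      set RB := pvVisit (pvChildren g) fuelB affB PySem.Set.empty with hRB
      have hreach : ∀ x, x ∈ RB ↔ ∃ a ∈ affB, pvRch g x a := by
        intro x
        constructor
        · exact S1 x
        · rintro ⟨a, ha, hr⟩
          exact pvVisit_complete g affB RB S2 x a hr ha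
      -- the roots loop is a filter
      rw [PySem.List.foldl_append_if]
      simp only [List.nil_append, List.map_id']
      -- pointwise agreement of the two root tests on affA
      have hpoint : ∀ wf ∈ affA,
          (PySem.Set.inter (PySem.Dict.getD cacheF wf PySem.Set.empty) affA).isEmpty =
          (!(PySem.Set.contains RB wf)) := by
        intro wf hwf
        obtain ⟨sw, hsw⟩ := pvContains_get (hcontF wf hwf)
        have hgetD : PySem.Dict.getD cacheF wf PySem.Set.empty = sw := by
          rw [PySem.Dict.getD_eq_get?_getD, hsw]
          rfl
        have hsm : ∀ d, d ∈ sw ↔ pvRch g wf d := hgoodF wf sw hsw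
        have hA : (PySem.Set.inter (PySem.Dict.getD cacheF wf PySem.Set.empty) affA).isEmpty = true ↔
            ¬ ∃ a ∈ affB, pvRch g wf a := by
          rw [hgetD, PySem.Set.inter, List.isEmpty_iff, List.filter_eq_nil_iff]
          constructor
          · rintro hemp ⟨a, ha, hr⟩
            exact hemp a ((hsm a).mpr hr) ((hcm affA a).mpr ((hAB a).mpr ha))
          · intro hne a has hca
            exact hne ⟨a, (hAB a).mp ((hcm affA a).mp hca), (hsm a).mp has⟩
        have hB : (!(PySem.Set.contains RB wf)) = true ↔ ¬ ∃ a ∈ affB, pvRch g wf a := by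
          rw [Bool.not_eq_true']
          constructor
          · intro h0 hex
            have := (hcm RB wf).mpr ((hreach wf).mpr hex)
            rw [h0] at this
            cases this
          · intro hne
            cases hc : PySem.Set.contains RB wf
            · rfl
            · exact absurd ((hreach wf).mp ((hcm RB wf).mp hc)) hne
        have hiff := hA.trans hB.symm
        have hbool : ∀ (a b : Bool), (a = true ↔ b = true) → a = b := by decide
        exact hbool _ _ hiff
      rw [List.filter_congr hpoint]
      have hperm : affA.Perm affB := (List.perm_ext_iff_of_nodup hndA hndB).mpr hAB
      exact PySem.List.sorted_eq_sorted_of_perm _ _ _ (fun a b hab => hab)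
        (hperm.filter (fun wf => !(PySem.Set.contains RB wf)))
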